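-- pv_equiv track=rewrite | github.com/yjcyxky/research-hub-mcp | python/build/lib/build/lib/rust_research_py/text2table/prompts.py | format_entities_as_list
-- ===== SOURCE A (Python) =====
-- from typing import List, Optional
--
-- def format_entities_as_list(
--     entities: List[dict],
--     labels: List[str],
--     use_gliner: bool = True,
-- ) -> str:
--     """
--     Format extracted entities as a bulleted list for the prompt.
--
--     Args:
--         entities: List of entity dictionaries with 'label' and 'text' keys.
--         labels: List of expected labels.
--         use_gliner: Whether GLiNER extraction is enabled.
--
--     Returns:
--         Formatted string of entities.
--     """
--     if not use_gliner:
--         return "- Entity extraction disabled; infer entities directly from the source text."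
--
--     if not entities:
--         return "- No entities were found with the current threshold."
--
--     # Group entities by label
--     grouped: dict[str, List[str]] = {label: [] for label in labels}
--     for entity in entities:
--         label = str(entity.get("label", "")).strip()
--         text = str(entity.get("text", "")).strip()
--         if not label or not text:
--             continue
--         if label not in grouped:
--             grouped[label] = []
--         if text not in grouped[label]:
--             grouped[label].append(text)
--
--     lines: List[str] = []
--     for label in labels:
--         values = grouped.get(label, [])
--         value_str = "; ".join(values) if values else "N/A"
--         lines.append(f"- {label}: {value_str}")
--
--     return "\n".join(lines)
-- ===== SOURCE B (Python) =====
-- def format_entities_as_list(entities, labels, use_gliner=True):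
--     if not use_gliner:
--         return "- Entity extraction disabled; infer entities directly from the source text."
--     if not entities:
--         return "- No entities were found with the current threshold."
--
--     # Stage 1: one pass stripping every entity into a (label, text) pair,
--     # keeping only those where both parts are non-empty.
--     stripped = [(str(e.get("label", "")).strip(), str(e.get("text", "")).strip())
--                 for e in entities]
--     pairs = [p for p in stripped if p[0] and p[1]]
--
--     # Stage 2: per label, filter matching texts and dedup preserving first appearance.
--     def line(label):
--         values = list(dict.fromkeys(t for l, t in pairs if l == label))
--         return "- " + label + ": " + ("; ".join(values) if values else "N/A")
--
--     return "\n".join(line(label) for label in labels)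
-- ===== Notes on version B (the rewrite author's own statement) =====
-- stated objective: simpler
-- what changed: Replaced A's incremental grouped-dict construction (conditional key creation and per-key dedup appends inside one entity loop, then a dict-lookup pass) by a staged pipeline: one pass stripping/filtering entities into a flat (label,text) pair list, then per label a filter plus a dict.fromkeys dedup.
import Mathlib
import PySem

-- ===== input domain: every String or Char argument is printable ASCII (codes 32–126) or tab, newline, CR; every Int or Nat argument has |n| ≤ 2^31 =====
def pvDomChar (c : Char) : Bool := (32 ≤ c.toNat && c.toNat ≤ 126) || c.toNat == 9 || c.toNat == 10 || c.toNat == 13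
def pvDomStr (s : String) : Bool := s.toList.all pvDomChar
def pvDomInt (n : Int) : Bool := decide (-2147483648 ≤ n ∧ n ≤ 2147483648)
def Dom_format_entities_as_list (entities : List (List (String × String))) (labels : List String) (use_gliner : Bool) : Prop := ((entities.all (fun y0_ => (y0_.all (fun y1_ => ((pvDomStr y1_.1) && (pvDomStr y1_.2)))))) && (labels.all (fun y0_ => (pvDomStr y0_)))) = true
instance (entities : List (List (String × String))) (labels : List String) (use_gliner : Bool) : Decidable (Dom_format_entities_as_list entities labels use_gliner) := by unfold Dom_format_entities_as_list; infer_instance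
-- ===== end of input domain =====

-- B replaces A's incremental grouped-dict with a staged pipeline: strip/filter once into flat pairs, then per-label filter + first-appearance dedup (objective: simpler).

-- ===== PORT A =====
-- one iteration of A's grouping loop over `entities`
def pvAStep (g : PySem.Dict String (List String)) (entity : List (String × String)) : PySem.Dict String (List String) :=
  let label := PySem.Str.strip (PySem.Dict.getD (PySem.Dict.ofList entity) "label" "")
  let text := PySem.Str.strip (PySem.Dict.getD (PySem.Dict.ofList entity) "text" "")
  if label = "" ∨ text = "" then g
  else
    let g1 := if (PySem.Dict.get? g label).isSome then g else PySem.Dict.insert g label []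
    let cur := PySem.Dict.getD g1 label []
    if text ∈ cur then g1 else PySem.Dict.insert g1 label (cur ++ [text])

def format_entities_as_list (entities : List (List (String × String))) (labels : List String) (use_gliner : Bool) : String :=
  if !use_gliner then "- Entity extraction disabled; infer entities directly from the source text."
  else if entities = [] then "- No entities were found with the current threshold."
  else
    let grouped0 := labels.foldl (fun g l => PySem.Dict.insert g l []) PySem.Dict.empty
    let grouped := entities.foldl pvAStep grouped0
    let lines := labels.foldl (fun ls label =>
      let values := PySem.Dict.getD grouped label []
      let value_str := if values ≠ [] then PySem.Str.join "; " values else "N/A"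
      ls ++ ["- " ++ label ++ ": " ++ value_str]) []
    PySem.Str.join "\n" lines

-- ===== PORT B =====
-- strip one entity into a (label, text) pair
def pvStripPair (e : List (String × String)) : String × String :=
  (PySem.Str.strip (PySem.Dict.getD (PySem.Dict.ofList e) "label" ""),
   PySem.Str.strip (PySem.Dict.getD (PySem.Dict.ofList e) "text" ""))

-- port of Source B's `list(dict.fromkeys(…))`: first-appearance dedup with a seen accumulator
def pvDedup : List String → List String → List String
  | [], _ => []
  | t :: ts, seen => if t ∈ seen then pvDedup ts seen else t :: pvDedup ts (t :: seen)

def format_entities_as_list_alt (entities : List (List (String × String))) (labels : List String) (use_gliner : Bool) : String :=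
  if !use_gliner then "- Entity extraction disabled; infer entities directly from the source text."
  else if entities = [] then "- No entities were found with the current threshold."
  else
    let stripped := entities.map pvStripPair
    let pairs := stripped.filter (fun p => p.1 != "" && p.2 != "")
    PySem.Str.join "\n" (labels.map (fun label =>
      let values := pvDedup ((pairs.filter (fun p => p.1 == label)).map Prod.snd) []
      "- " ++ label ++ ": " ++ (if values ≠ [] then PySem.Str.join "; " values else "N/A")))

-- ===== PRECONDITION & SPEC =====
def Spec_format_entities_as_list (entities : List (List (String × String))) (labels : List String) (use_gliner : Bool) (out : String) : Prop := out = format_entities_as_list_alt entities labels use_gliner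
instance (entities : List (List (String × String))) (labels : List String) (use_gliner : Bool) (out : String) : Decidable (Spec_format_entities_as_list entities labels use_gliner out) := by unfold Spec_format_entities_as_list; infer_instance

-- ===== CLAIM (what is proved, stated in full; the proofs are below) =====
def Claim_equal_format_entities_as_list : Prop := ∀ (entities : List (List (String × String))) (labels : List String) (use_gliner : Bool), Dom_format_entities_as_list entities labels use_gliner → Spec_format_entities_as_list entities labels use_gliner (format_entities_as_list entities labels use_gliner)

-- ===== LEMMAS AND PROOFS =====

-- proof-only description of what A's loop does to the projection of `grouped` at one label
def pvScanStep (label : String) (values : List String) (entity : List (String × String)) : List String :=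
  let lab := PySem.Str.strip (PySem.Dict.getD (PySem.Dict.ofList entity) "label" "")
  let text := PySem.Str.strip (PySem.Dict.getD (PySem.Dict.ofList entity) "text" "")
  if lab = label ∧ lab ≠ "" ∧ text ≠ "" ∧ text ∉ values then values ++ [text] else values

theorem pvStep_getD (g : PySem.Dict String (List String)) (e : List (String × String)) (l : String) :
    PySem.Dict.getD (pvAStep g e) l [] = pvScanStep l (PySem.Dict.getD g l []) e := by
  unfold pvAStep pvScanStep
  set lab := PySem.Str.strip (PySem.Dict.getD (PySem.Dict.ofList e) "label" "") with hlab
  set txt := PySem.Str.strip (PySem.Dict.getD (PySem.Dict.ofList e) "text" "") with htxt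
  by_cases h0 : lab = "" ∨ txt = ""
  · simp only [if_pos h0]
    rcases h0 with h | h
    · by_cases hl : lab = l
      · subst hl; simp [h]
      · simp [hl]
    · simp [h]
  · simp only [if_neg h0]
    push Not at h0
    obtain ⟨hlne, htne⟩ := h0
    have hens : ∀ l', PySem.Dict.getD (if (PySem.Dict.get? g lab).isSome then g
        else PySem.Dict.insert g lab []) l' [] = PySem.Dict.getD g l' [] := by
      intro l'
      split
      · rfl
      · rename_i hnone
        rw [PySem.Dict.getD_insert]
        split
        · rename_i heq
          rw [heq, PySem.Dict.getD_eq_get?_getD]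
          cases hg : PySem.Dict.get? g lab with
          | none => rfl
          | some v => exact absurd (by simp [hg]) hnone
        · rfl
    simp only [hens]
    by_cases hl : lab = l
    · subst hl
      by_cases hmem : txt ∈ PySem.Dict.getD g lab []
      · simp [hmem, hens, hlne, htne]
      · simp [hmem, hlne, htne]
    · have hne : l ≠ lab := fun h => hl h.symm
      by_cases hmem : txt ∈ PySem.Dict.getD g lab []
      · simp [hmem, hens, hl]
      · simp only [hens, if_neg hmem, PySem.Dict.getD_insert, if_neg hne]
        simp [hl]

theorem pvFold_getD (entities : List (List (String × String))) (g : PySem.Dict String (List String)) (l : String) :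
    PySem.Dict.getD (entities.foldl pvAStep g) l [] = entities.foldl (pvScanStep l) (PySem.Dict.getD g l []) := by
  induction entities generalizing g with
  | nil => rfl
  | cons e es ih => simp only [List.foldl_cons, ih, pvStep_getD]

theorem pvInit_getD (labels : List String) (g : PySem.Dict String (List String)) (l : String)
    (h : PySem.Dict.getD g l [] = []) :
    PySem.Dict.getD (labels.foldl (fun g l => PySem.Dict.insert g l []) g) l [] = [] := by
  induction labels generalizing g with
  | nil => exact h
  | cons x xs ih =>
      apply ih
      rw [PySem.Dict.getD_insert]
      split <;> simp [h]

theorem pvLines_eq (labels : List String) (f : String → String) (acc : List String) :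
    labels.foldl (fun ls label => ls ++ [f label]) acc = acc ++ labels.map f := by
  induction labels generalizing acc with
  | nil => simp
  | cons x xs ih => simp [ih]

-- pvDedup only looks at the seen accumulator through membership
theorem pvDedup_congr (ts : List String) (s1 s2 : List String)
    (h : ∀ x, x ∈ s1 ↔ x ∈ s2) : pvDedup ts s1 = pvDedup ts s2 := by
  induction ts generalizing s1 s2 with
  | nil => rfl
  | cons t ts ih =>
      simp only [pvDedup]
      by_cases hm : t ∈ s1
      · rw [if_pos hm, if_pos ((h t).mp hm), ih s1 s2 h]
      · rw [if_neg hm, if_neg (fun c => hm ((h t).mpr c)), ih (t :: s1) (t :: s2) (by intro x; simp [h x])]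

-- A's per-label scan equals B's filter-then-dedup, for any seen accumulator
theorem pvScan_eq (l : String) (es : List (List (String × String))) (acc : List String) :
    es.foldl (pvScanStep l) acc =
      acc ++ pvDedup ((((es.map pvStripPair).filter (fun p => p.1 != "" && p.2 != "")).filter
        (fun p => p.1 == l)).map Prod.snd) acc := by
  induction es generalizing acc with
  | nil => simp [pvDedup]
  | cons e es ih =>
      have hsp : pvStripPair e = (PySem.Str.strip (PySem.Dict.getD (PySem.Dict.ofList e) "label" ""),
        PySem.Str.strip (PySem.Dict.getD (PySem.Dict.ofList e) "text" "")) := rfl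
      set lab := PySem.Str.strip (PySem.Dict.getD (PySem.Dict.ofList e) "label" "") with hlab
      set txt := PySem.Str.strip (PySem.Dict.getD (PySem.Dict.ofList e) "text" "") with htxt
      have hstep : ∀ vs, pvScanStep l vs e =
          if lab = l ∧ lab ≠ "" ∧ txt ≠ "" ∧ txt ∉ vs then vs ++ [txt] else vs := fun vs => rfl
      simp only [List.foldl_cons, List.map_cons, hsp, List.filter_cons, hstep]
      by_cases hkeep : lab = l ∧ lab ≠ "" ∧ txt ≠ ""
      · obtain ⟨h1, h2, h3⟩ := hkeep
        rw [if_pos (show ((lab, txt).1 != "" && (lab, txt).2 != "") = true by simp [h2, h3])]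
        rw [List.filter_cons, if_pos (show ((lab, txt).1 == l) = true by simp [h1])]
        simp only [List.map_cons, pvDedup]
        by_cases hmem : txt ∈ acc
        · rw [if_neg (by simp [hmem]), if_pos hmem, ih acc]
        · rw [if_pos ⟨h1, h2, h3, hmem⟩, if_neg hmem, ih (acc ++ [txt])]
          simp only [List.append_assoc, List.singleton_append]
          congr 2
          exact pvDedup_congr _ _ _ (by intro x; simp [or_comm])
      · have hnotin : (if lab = l ∧ lab ≠ "" ∧ txt ≠ "" ∧ txt ∉ acc then acc ++ [txt] else acc) = acc := by
          rw [if_neg (fun ⟨a, b, c, _⟩ => hkeep ⟨a, b, c⟩)]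
        rw [hnotin]
        by_cases hf : lab ≠ "" ∧ txt ≠ ""
        · obtain ⟨h2, h3⟩ := hf
          have h1 : lab ≠ l := fun c => hkeep ⟨c, h2, h3⟩
          rw [if_pos (show ((lab, txt).1 != "" && (lab, txt).2 != "") = true by simp [h2, h3]),
            List.filter_cons, if_neg (by simp [h1])]
          exact ih acc
        · rw [if_neg (by simpa using hf)]
          exact ih acc

-- ===== VERDICT (by name: the statement is the Claim_ definition above) =====
theorem format_entities_as_list_spec : Claim_equal_format_entities_as_list := by
  intro entities labels use_gliner _
  unfold Spec_format_entities_as_list format_entities_as_list format_entities_as_list_alt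
  cases use_gliner with
  | false => rfl
  | true =>
    simp only [Bool.not_true, if_neg (by decide : ¬ (false = true))]
    by_cases he : entities = []
    · simp [he]
    · simp only [if_neg he]
      congr 1
      rw [pvLines_eq labels _ []]
      simp only [List.nil_append]
      apply List.map_congr_left
      intro l _
      have hA := pvFold_getD entities (labels.foldl (fun g l => PySem.Dict.insert g l []) PySem.Dict.empty) l
      rw [pvInit_getD labels PySem.Dict.empty l (by rfl)] at hA
      rw [hA, pvScan_eq l entities []]
      rfl
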